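-- pv_equiv track=rewrite | github.com/ndzindo1/eegsignalcompression | pycode/pronalazakNajpogodnijeDelte.py | inverznaDeltaModulacija
-- ===== SOURCE A (Python) =====
-- def inverznaDeltaModulacija(pocetnaVrijednost, delta, nizBita):
--     noviSignal = [pocetnaVrijednost]
--
--     for i in range(len(nizBita)):
--         if (nizBita[i] == True):
--             noviSignal.append(noviSignal[i] + delta)
--         else:
--             noviSignal.append(noviSignal[i] - delta)
--
--     return noviSignal
-- ===== SOURCE B (Python) =====
-- def inverznaDeltaModulacija(pocetnaVrijednost, delta, nizBita):
--     # divide-and-conquer: offsets(bs) is the list of cumulative offsets from the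
--     # starting value (length len(bs)+1, starting at 0); halves are solved
--     # independently and the right half is shifted by the left half's last offset.
--     def offsets(bs):
--         if len(bs) == 0:
--             return [0]
--         if len(bs) == 1:
--             return [0, delta if bs[0] == True else -delta]
--         mid = len(bs) // 2
--         L = offsets(bs[:mid])
--         R = offsets(bs[mid:])
--         last = L[-1]
--         return L + [last + x for x in R[1:]]
--     return [pocetnaVrijednost + x for x in offsets(nizBita)]
-- ===== Notes on version B (the rewrite author's own statement) =====
-- stated objective: alternative
-- what changed: Replaces A's left-to-right self-referential index loop (appending noviSignal[i] +/- delta) with a divide-and-conquer reconstruction: the bit list is split in half, each half's offset list is reconstructed recursively and the right half is shifted by the left half's final offset, then the starting value is added in one final pass.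
import Mathlib
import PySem

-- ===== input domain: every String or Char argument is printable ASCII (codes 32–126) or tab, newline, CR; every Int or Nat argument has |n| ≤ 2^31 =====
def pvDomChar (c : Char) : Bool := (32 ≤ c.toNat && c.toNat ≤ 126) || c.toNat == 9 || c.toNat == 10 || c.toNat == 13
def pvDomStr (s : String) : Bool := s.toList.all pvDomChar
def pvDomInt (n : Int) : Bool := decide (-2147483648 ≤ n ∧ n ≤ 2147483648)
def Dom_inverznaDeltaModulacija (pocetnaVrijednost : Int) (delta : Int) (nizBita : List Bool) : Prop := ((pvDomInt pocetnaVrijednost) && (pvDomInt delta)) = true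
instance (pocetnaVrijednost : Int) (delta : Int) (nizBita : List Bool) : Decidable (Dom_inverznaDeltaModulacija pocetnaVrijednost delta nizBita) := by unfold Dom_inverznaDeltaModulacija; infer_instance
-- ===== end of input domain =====

-- B replaces A's left-to-right self-referential index loop by a divide-and-conquer
-- reconstruction (solve both halves, shift the right half by the left half's last
-- offset); an alternative decomposition, not claimed faster.

-- ===== PORT A =====
-- literal transliteration: loop i over range(len(nizBita)), reading nizBita[i] and noviSignal[i]
def inverznaDeltaModulacija (pocetnaVrijednost : Int) (delta : Int) (nizBita : List Bool) : List Int :=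
  (PySem.List.pyRange 0 (nizBita.length : Int) 1).foldl
    (fun noviSignal i =>
      if (PySem.List.pyGet? nizBita i).getD false == true then
        noviSignal ++ [(PySem.List.pyGet? noviSignal i).getD 0 + delta]
      else
        noviSignal ++ [(PySem.List.pyGet? noviSignal i).getD 0 - delta])
    [pocetnaVrijednost]

-- ===== PORT B =====
-- offsets(bs) of Source B: divide and conquer on the bit list.
-- bs[:mid] / bs[mid:] with 0 ≤ mid ≤ len(bs) are ported as take/drop (exact there);
-- L[-1] is ported via pyGet? L (-1) (L is never empty, so the IndexError case is dead);
-- R[1:] is ported via PySem.List.slice R (some 1) none.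
def pvOffsets (delta : Int) (bs : List Bool) : List Int :=
  if h0 : bs.length = 0 then [0]
  else if h1 : bs.length = 1 then
    [0, if (PySem.List.pyGet? bs 0).getD false == true then delta else -delta]
  else
    let mid := bs.length / 2
    let L := pvOffsets delta (bs.take mid)
    let R := pvOffsets delta (bs.drop mid)
    let last := (PySem.List.pyGet? L (-1)).getD 0
    L ++ (PySem.List.slice R (some 1) none).map (fun x => last + x)
termination_by bs.length
decreasing_by
  · simp only [List.length_take]; omega
  · simp only [List.length_drop]; omega

def inverznaDeltaModulacija_alt (pocetnaVrijednost : Int) (delta : Int) (nizBita : List Bool) : List Int :=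
  (pvOffsets delta nizBita).map (fun x => pocetnaVrijednost + x)

-- ===== PRECONDITION & SPEC =====
def Spec_inverznaDeltaModulacija (pocetnaVrijednost : Int) (delta : Int) (nizBita : List Bool) (out : List Int) : Prop := out = inverznaDeltaModulacija_alt pocetnaVrijednost delta nizBita
instance (pocetnaVrijednost : Int) (delta : Int) (nizBita : List Bool) (out : List Int) : Decidable (Spec_inverznaDeltaModulacija pocetnaVrijednost delta nizBita out) := by unfold Spec_inverznaDeltaModulacija; infer_instance

-- ===== CLAIM (what is proved, stated in full; the proofs are below) =====
def Claim_equal_inverznaDeltaModulacija : Prop := ∀ (pocetnaVrijednost : Int) (delta : Int) (nizBita : List Bool), Dom_inverznaDeltaModulacija pocetnaVrijednost delta nizBita → Spec_inverznaDeltaModulacija pocetnaVrijednost delta nizBita (inverznaDeltaModulacija pocetnaVrijednost delta nizBita)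

-- ===== LEMMAS AND PROOFS =====

-- reference sequential form of the offsets list, used only in the proofs
def pvF (d : Int) : List Bool → List Int
  | [] => [0]
  | b :: bs => 0 :: (pvF d bs).map (fun x => (if b == true then d else -d) + x)

theorem pvF_ne_nil (d : Int) (l : List Bool) : pvF d l ≠ [] := by
  cases l <;> simp [pvF]

theorem pvF_head (d : Int) (l : List Bool) : pvF d l = 0 :: (pvF d l).tail := by
  cases l <;> simp [pvF]

theorem pvF_length (d : Int) (l : List Bool) : (pvF d l).length = l.length + 1 := by
  induction l with
  | nil => simp [pvF]
  | cons b bs ih => simp [pvF, ih]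

theorem pvF_getLastD_cons (d : Int) (b : Bool) (bs : List Bool) :
    (pvF d (b :: bs)).getLastD 0
      = (if b == true then d else -d) + (pvF d bs).getLastD 0 := by
  obtain ⟨y, ys, hys⟩ : ∃ y ys, pvF d bs = y :: ys := by
    cases h : pvF d bs with
    | nil => exact absurd h (pvF_ne_nil d bs)
    | cons y ys => exact ⟨y, ys, rfl⟩
  simp only [pvF, hys, List.getLastD_eq_getLast?]
  rw [List.map_cons, List.getLast?_cons_cons, ← List.map_cons, List.getLast?_map]
  cases h2 : (y :: ys).getLast? with
  | none => simp at h2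
  | some z => simp

theorem pvF_append (d : Int) (xs ys : List Bool) :
    pvF d (xs ++ ys)
      = pvF d xs ++ ((pvF d ys).tail.map (fun x => (pvF d xs).getLastD 0 + x)) := by
  induction xs with
  | nil =>
    simp only [List.nil_append, pvF, List.getLastD_cons]
    simp only [List.getLastD_nil, zero_add, List.map_id_fun', id]
    exact pvF_head d ys
  | cons b bs ih =>
    have hl := pvF_getLastD_cons d b bs
    simp only [pvF] at hl
    simp only [List.cons_append, pvF, ih, List.map_append, List.map_map, hl]
    congr 2
    apply List.map_congr_left
    intro x _
    simp [Function.comp, add_assoc]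

theorem pvF_snoc (d : Int) (xs : List Bool) (b : Bool) :
    pvF d (xs ++ [b])
      = pvF d xs ++ [(pvF d xs).getLastD 0 + (if b == true then d else -d)] := by
  rw [pvF_append]
  simp [pvF]

-- the divide-and-conquer offsets equal the sequential reference form
theorem pvOffsets_eq_pvF (d : Int) (bs : List Bool) : pvOffsets d bs = pvF d bs := by
  induction hn : bs.length using Nat.strong_induction_on generalizing bs with
  | _ n ih =>
    match bs, hn with
    | [], _ => simp [pvOffsets, pvF]
    | [b], _ => simp [pvOffsets, pvF]
    | b₁ :: b₂ :: rest, hn =>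
      set bs' := b₁ :: b₂ :: rest with hbs
      have hlen2 : bs'.length = rest.length + 2 := by simp [hbs]
      have hne0 : ¬ bs'.length = 0 := by omega
      have hne1 : ¬ bs'.length = 1 := by omega
      have hL : pvOffsets d (bs'.take (bs'.length / 2)) = pvF d (bs'.take (bs'.length / 2)) := by
        apply ih (bs'.take (bs'.length / 2)).length _ _ rfl
        rw [← hn]; simp only [List.length_take]; omega
      have hR : pvOffsets d (bs'.drop (bs'.length / 2)) = pvF d (bs'.drop (bs'.length / 2)) := by
        apply ih (bs'.drop (bs'.length / 2)).length _ _ rfl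
        rw [← hn]; simp only [List.length_drop]; omega
      rw [pvOffsets, dif_neg hne0, dif_neg hne1]
      simp only [PySem.List.slice_from_one, PySem.List.pyGet?_neg_one, hL, hR]
      rw [← List.getLastD_eq_getLast?, ← pvF_append, List.take_append_drop]

-- invariant for A's loop: after n iterations its list is p + offsets of the first n bits
theorem pv_invariant (p d : Int) (bits : List Bool) :
    ∀ n : Nat, n ≤ bits.length →
      ((PySem.List.pyRange 0 (n : Int) 1).foldl
         (fun noviSignal i =>
           if (PySem.List.pyGet? bits i).getD false == true then
             noviSignal ++ [(PySem.List.pyGet? noviSignal i).getD 0 + d]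
           else
             noviSignal ++ [(PySem.List.pyGet? noviSignal i).getD 0 - d])
         [p] = (pvF d (bits.take n)).map (fun x => p + x)
       ∧ ((pvF d (bits.take n)).map (fun x => p + x))[n]?
           = some (p + (pvF d (bits.take n)).getLastD 0)) := by
  intro n
  induction n with
  | zero =>
    intro _
    simp [pvF]
  | succ n ih =>
    intro hle
    have hn : n ≤ bits.length := Nat.le_of_succ_le hle
    have hlt : n < bits.length := hle
    obtain ⟨hA, hget⟩ := ih hn
    have hrange : PySem.List.pyRange 0 ((n : Nat) + 1 : Int) 1
        = PySem.List.pyRange 0 (n : Int) 1 ++ [(n : Int)] :=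
      PySem.List.pyRange_one_succ_right (by exact_mod_cast Nat.zero_le n)
    have htake : bits.take (n + 1) = bits.take n ++ [bits[n]] := by
      rw [List.take_add_one, List.getElem?_eq_getElem hlt]; rfl
    have hlenmap : ((pvF d (bits.take n)).map (fun x => p + x)).length = n + 1 := by
      simp [pvF_length, List.length_take, Nat.min_eq_left hn]
    have hbitn : (PySem.List.pyGet? bits (n : Int)).getD false = bits[n] := by
      rw [PySem.List.pyGet?_natCast, List.getElem?_eq_getElem hlt]; rfl
    have hgetn : (PySem.List.pyGet? ((pvF d (bits.take n)).map (fun x => p + x)) (n : Int)).getD 0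
        = p + (pvF d (bits.take n)).getLastD 0 := by
      rw [PySem.List.pyGet?_natCast, hget]; rfl
    push_cast
    rw [hrange, List.foldl_append, hA]
    simp only [List.foldl_cons, List.foldl_nil]
    rw [htake, pvF_snoc]
    constructor
    · by_cases hb : bits[n] = true
      · rw [if_pos (by rw [hbitn, hb]; rfl), hgetn]
        simp [hb, List.map_append, add_assoc]
      · rw [if_neg (by rw [hbitn]; simp [hb]), hgetn]
        have hbf : bits[n] = false := by simpa using hb
        simp [hbf, List.map_append, add_assoc, sub_eq_add_neg]
    · have hne : pvF d (bits.take n) ≠ [] := pvF_ne_nil d _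
      rw [List.map_append]
      rw [List.getElem?_append_right (by simp [hlenmap])]
      simp [hlenmap]

-- ===== VERDICT (by name: the statement is the Claim_ definition above) =====
theorem inverznaDeltaModulacija_spec : Claim_equal_inverznaDeltaModulacija := by
  intro p d bits _
  have h := (pv_invariant p d bits bits.length le_rfl).1
  simp only [List.take_length] at h
  unfold Spec_inverznaDeltaModulacija inverznaDeltaModulacija inverznaDeltaModulacija_alt
  rw [pvOffsets_eq_pvF]
  exact h
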